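-- pv_equiv track=rewrite | github.com/eunos-1128/openstructure | modules/mol/alg/pymod/chain_mapping.py | _CheckOneToOneMapping
-- ===== SOURCE A (Python) =====
-- def _CheckOneToOneMapping(ref_chains, mdl_chains):
--     """ Checks whether we already have a perfect one to one mapping
--
--     That means each list in *ref_chains* has exactly one element and each
--     list in *mdl_chains* has either one element (it's mapped) or is empty
--     (ref chain has no mapped mdl chain). Returns None if no such mapping
--     can be found.
--
--     :param ref_chains: corresponds to :attr:`ChainMapper.chem_groups`
--     :type ref_chains: :class:`list` of :class:`list` of :class:`str`
--     :param mdl_chains: mdl chains mapped to chem groups in *ref_chains*, i.e.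
--                        the return value of :func:`ChainMapper.GetChemMapping`
--     :type mdl_chains: class:`list` of :class:`list` of :class:`str`
--     :returns: A :class:`list` of :class:`list` if a one to one mapping is found,
--               None otherwise
--     """
--     only_one_to_one = True
--     one_to_one = list()
--     for ref, mdl in zip(ref_chains, mdl_chains):
--         if len(ref) == 1 and len(mdl) == 1:
--             one_to_one.append(mdl)
--         elif len(ref) == 1 and len(mdl) == 0:
--             one_to_one.append([None])
--         else:
--             only_one_to_one = False
--             break
--     if only_one_to_one:
--         return one_to_one
--     else:
--         return None
-- ===== SOURCE B (Python) =====
-- def _CheckOneToOneMapping(ref_chains, mdl_chains):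
--     pairs = list(zip(ref_chains, mdl_chains))
--     if not all(len(ref) == 1 and len(mdl) in (0, 1) for ref, mdl in pairs):
--         return None
--     return [mdl if len(mdl) == 1 else [None] for ref, mdl in pairs]
-- ===== Notes on version B (the rewrite author's own statement) =====
-- stated objective: simpler
-- what changed: Replaces A's single interleaved validate-and-build loop with early break by two separate passes over the zipped lists: a short-circuiting all() validity check, then a list comprehension building the result.
import Mathlib
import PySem

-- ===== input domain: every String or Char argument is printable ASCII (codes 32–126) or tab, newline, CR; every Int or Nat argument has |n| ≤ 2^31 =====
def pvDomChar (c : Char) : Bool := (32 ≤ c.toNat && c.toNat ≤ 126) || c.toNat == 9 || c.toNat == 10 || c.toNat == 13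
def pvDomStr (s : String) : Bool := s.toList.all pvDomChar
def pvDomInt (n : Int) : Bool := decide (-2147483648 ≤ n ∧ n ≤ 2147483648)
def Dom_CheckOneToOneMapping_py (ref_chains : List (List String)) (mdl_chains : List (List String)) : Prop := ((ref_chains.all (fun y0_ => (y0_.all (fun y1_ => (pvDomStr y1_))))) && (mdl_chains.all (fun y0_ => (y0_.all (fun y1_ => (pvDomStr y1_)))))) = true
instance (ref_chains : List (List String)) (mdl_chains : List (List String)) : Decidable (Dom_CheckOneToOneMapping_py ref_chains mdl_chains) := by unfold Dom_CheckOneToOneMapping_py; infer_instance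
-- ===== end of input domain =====

-- B replaces A's single validate-and-build loop (early break) by two passes: an all() validity check, then a comprehension building the result (objective: simpler).

-- ===== PORT A =====
-- A's loop over zip(ref_chains, mdl_chains) with accumulator one_to_one; `none` is the early-break `return None`.
def pvLoopA : List (List String × List String) → List (List (Option String)) → Option (List (List (Option String)))
  | [], acc => some acc
  | (r, m) :: rest, acc =>
    if r.length = 1 ∧ m.length = 1 then pvLoopA rest (acc ++ [m.map some])
    else if r.length = 1 ∧ m.length = 0 then pvLoopA rest (acc ++ [[(none : Option String)]])
    else none

def CheckOneToOneMapping_py (ref_chains : List (List String)) (mdl_chains : List (List String)) : Option (List (List (Option String))) :=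
  pvLoopA (ref_chains.zip mdl_chains) []

-- ===== PORT B =====
def CheckOneToOneMapping_py_alt (ref_chains : List (List String)) (mdl_chains : List (List String)) : Option (List (List (Option String))) :=
  let pairs := ref_chains.zip mdl_chains
  if pairs.all (fun p => p.1.length == 1 && (p.2.length == 0 || p.2.length == 1)) then
    some (pairs.map (fun p => if p.2.length == 1 then p.2.map some else [(none : Option String)]))
  else
    none

-- ===== PRECONDITION & SPEC =====
def Spec_CheckOneToOneMapping_py (ref_chains : List (List String)) (mdl_chains : List (List String)) (out : Option (List (List (Option String)))) : Prop := out = CheckOneToOneMapping_py_alt ref_chains mdl_chains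
instance (ref_chains : List (List String)) (mdl_chains : List (List String)) (out : Option (List (List (Option String)))) : Decidable (Spec_CheckOneToOneMapping_py ref_chains mdl_chains out) := by unfold Spec_CheckOneToOneMapping_py; infer_instance

-- ===== CLAIM (what is proved, stated in full; the proofs are below) =====
def Claim_equal_CheckOneToOneMapping_py : Prop := ∀ (ref_chains : List (List String)) (mdl_chains : List (List String)), Dom_CheckOneToOneMapping_py ref_chains mdl_chains → Spec_CheckOneToOneMapping_py ref_chains mdl_chains (CheckOneToOneMapping_py ref_chains mdl_chains)

-- ===== LEMMAS AND PROOFS =====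
lemma pvLoopA_eq (l : List (List String × List String)) (acc : List (List (Option String))) :
    pvLoopA l acc =
      if l.all (fun p => p.1.length == 1 && (p.2.length == 0 || p.2.length == 1)) then
        some (acc ++ l.map (fun p => if p.2.length == 1 then p.2.map some else [(none : Option String)]))
      else none := by
  induction l generalizing acc with
  | nil => simp [pvLoopA]
  | cons hd tl ih =>
    obtain ⟨r, m⟩ := hd
    simp only [pvLoopA, List.all_cons, List.map_cons]
    by_cases h1 : r.length = 1 ∧ m.length = 1
    · obtain ⟨hr, hm⟩ := h1
      rw [if_pos ⟨hr, hm⟩, ih]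
      simp only [hr, hm, beq_self_eq_true, Bool.true_and, Bool.or_true]
      simp
    · by_cases h2 : r.length = 1 ∧ m.length = 0
      · rw [if_neg h1, if_pos h2, ih]
        obtain ⟨hr, hm⟩ := h2
        simp only [hr, hm, beq_self_eq_true, Bool.true_and, Bool.true_or]
        simp
      · rw [if_neg h1, if_neg h2]
        have : ¬ (r.length = 1 ∧ (m.length = 0 ∨ m.length = 1)) := by tauto
        split
        · rename_i hall
          simp only [Bool.and_eq_true, beq_iff_eq, Bool.or_eq_true] at hall
          exact absurd ⟨hall.1.1, hall.1.2⟩ this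
        · rfl

-- ===== VERDICT (by name: the statement is the Claim_ definition above) =====
theorem CheckOneToOneMapping_py_spec : Claim_equal_CheckOneToOneMapping_py := by
  intro ref_chains mdl_chains _
  unfold Spec_CheckOneToOneMapping_py CheckOneToOneMapping_py CheckOneToOneMapping_py_alt
  rw [pvLoopA_eq]
  simp
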